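-- pv_equiv track=rewrite | github.com/thib-sim/meca-sim | bfs.py | descendance
-- ===== SOURCE A (Python) =====
-- def direct_child(aa,bb):
--     child=[]
--     for cle, valeur in aa.items():
--         if valeur in bb:
--             child.append(cle)
--     return child
--
-- def descendance(aa,bb):
--     child=bb
--     descendant=child
--     while child!=[]:
--         child=direct_child(aa,child)
--         for c in child:
--             descendant.append(c)
--     return descendant
-- ===== SOURCE B (Python) =====
-- def descendance(aa, bb):
--     # Reverse adjacency built once, then a level-by-level BFS: each level is
--     # gathered from the children buckets of the previous frontier and emitted
--     # in dict-key order, instead of rescanning the whole dict with a list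
--     # membership test per level.  Unlike A, bb is not mutated (return value only).
--     children = {}
--     for k, v in aa.items():
--         children.setdefault(v, []).append(k)
--     order = {k: i for i, k in enumerate(aa)}
--     out = list(bb)
--     frontier = set(bb)
--     while frontier:
--         nxt = []
--         for p in frontier:
--             nxt.extend(children.get(p, []))
--         nxt = sorted(set(nxt), key=lambda k: order[k])
--         out.extend(nxt)
--         frontier = set(nxt)
--     return out
-- ===== Notes on version B (the rewrite author's own statement) =====
-- stated objective: faster
-- what changed: B builds a reverse (parent-to-children) adjacency index and a key-order index once, then gathers each BFS level from the children buckets of the previous frontier and sorts it by dict-key position, instead of A's rescan of the whole dict with a list-membership test for every level.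
import Mathlib
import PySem

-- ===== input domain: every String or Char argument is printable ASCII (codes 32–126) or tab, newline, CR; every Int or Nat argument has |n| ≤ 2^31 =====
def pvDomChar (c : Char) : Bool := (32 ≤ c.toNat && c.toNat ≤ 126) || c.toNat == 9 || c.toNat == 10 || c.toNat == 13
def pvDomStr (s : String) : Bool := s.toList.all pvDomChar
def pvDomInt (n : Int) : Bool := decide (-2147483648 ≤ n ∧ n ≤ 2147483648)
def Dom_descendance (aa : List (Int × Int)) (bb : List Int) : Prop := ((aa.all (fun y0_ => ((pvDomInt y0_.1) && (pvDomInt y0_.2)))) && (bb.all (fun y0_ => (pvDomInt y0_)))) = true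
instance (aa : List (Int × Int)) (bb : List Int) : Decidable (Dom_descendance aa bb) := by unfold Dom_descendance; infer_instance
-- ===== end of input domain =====

-- B gathers each level from a reverse-adjacency index instead of rescanning the whole dict with a
-- list-membership test per level (objective: faster).  Python A mutates bb in place (appends to it);
-- B does not — the equivalence proved here is about the RETURN value only.

-- ===== PORT A =====
def direct_child (aa : List (Int × Int)) (bb : List Int) : List Int :=
  aa.foldl (fun child kv => if kv.2 ∈ bb then child ++ [kv.1] else child) []

-- fuel makes the while-loop total: on inputs satisfying Pre_descendance every level beyond the
-- aa.length-th is empty (a non-empty level n needs a parent chain of n distinct keys), so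
-- aa.length + 2 iterations are never exhausted; outside Pre_ the Python loop diverges.
def descLoopA (aa : List (Int × Int)) : Nat → List Int → List Int → List Int
  | 0, _, descendant => descendant
  | n+1, child, descendant =>
    if child = [] then descendant
    else
      let c := direct_child aa child
      descLoopA aa n c (descendant ++ c)

def descendance (aa : List (Int × Int)) (bb : List Int) : List Int :=
  descLoopA aa (aa.length + 2) bb bb

-- ===== PORT B =====
-- children.setdefault(v, []).append(k) over the items (k, v) of aa: d[v] = d.get(v, []) + [k]
def childrenDict (aa : List (Int × Int)) : PySem.Dict Int (List Int) :=
  (aa.map (fun kv => (kv.2, kv.1))).foldl (fun d p => d.modify p.1 [] (· ++ [p.2])) PySem.Dict.empty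

-- order = {k: i for i, k in enumerate(aa)}
def orderDict (aa : List (Int × Int)) : PySem.Dict Int Int :=
  (PySem.List.enumerate (aa.map Prod.fst) 0).foldl (fun d p => d.insert p.2 p.1) PySem.Dict.empty

-- order[k] in Source B never raises (every gathered k is a key of aa), so getD's default is never read.
-- Same fuel remark as for descLoopA: Source B's while-loop runs the same number of times as A's.
def descLoopB (children : PySem.Dict Int (List Int)) (order : PySem.Dict Int Int) :
    Nat → PySem.Set Int → List Int → List Int
  | 0, _, out => out
  | n+1, frontier, out =>
    if frontier = [] then out
    else
      let nxt := frontier.foldl (fun acc p => acc ++ children.getD p []) []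
      let lvl := PySem.List.sorted (PySem.Set.ofList nxt) (fun k => order.getD k 0) false
      descLoopB children order n (PySem.Set.ofList lvl) (out ++ lvl)

def descendance_alt (aa : List (Int × Int)) (bb : List Int) : List Int :=
  descLoopB (childrenDict aa) (orderDict aa) (aa.length + 2) (PySem.Set.ofList bb) bb

-- ===== PRECONDITION & SPEC =====
-- iterParent aa n x = x's ancestor n parent-steps up (none once x is not a key)
def iterParent (aa : List (Int × Int)) : Nat → Int → Option Int
  | 0, x => some x
  | n+1, x => (List.lookup x aa).bind (iterParent aa n)

-- Pre_ excludes (a) association lists with duplicate keys, which do not represent a Python dict,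
-- and (b) inputs where some element of bb is a key lying on a cycle of the parent map — exactly the
-- inputs on which Python A's while-loop (and Source B's) never terminates.
def Pre_descendance (aa : List (Int × Int)) (bb : List Int) : Prop :=
  (aa.map Prod.fst).Nodup ∧
  ∀ p ∈ aa, p.1 ∈ bb → ∀ n ∈ List.range aa.length, iterParent aa (n+1) p.1 ≠ some p.1
instance (aa : List (Int × Int)) (bb : List Int) : Decidable (Pre_descendance aa bb) := by
  unfold Pre_descendance; infer_instance

def pvWitness_descendance : (List (Int × Int)) × List Int := ([(2, 1), (3, 1), (4, 2)], [1])

def Spec_descendance (aa : List (Int × Int)) (bb : List Int) (out : List Int) : Prop := out = descendance_alt aa bb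
instance (aa : List (Int × Int)) (bb : List Int) (out : List Int) : Decidable (Spec_descendance aa bb out) := by unfold Spec_descendance; infer_instance

-- ===== CLAIM (what is proved, stated in full; the proofs are below) =====
def Claim_equal_descendance : Prop := ∀ (aa : List (Int × Int)) (bb : List Int), Dom_descendance aa bb → Pre_descendance aa bb → Spec_descendance aa bb (descendance aa bb)

-- ===== LEMMAS AND PROOFS =====

-- A's inner scan is a filter of the dict items.
lemma direct_child_eq (aa : List (Int × Int)) (T : List Int) :
    direct_child aa T = (aa.filter (fun kv => decide (kv.2 ∈ T))).map Prod.fst := by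
  unfold direct_child
  simpa using PySem.List.foldl_append_if (fun kv : Int × Int => decide (kv.2 ∈ T)) Prod.fst aa []

-- membership in a children bucket is membership in aa with that parent
lemma mem_childrenDict (aa : List (Int × Int)) (p k : Int) :
    k ∈ (childrenDict aa).getD p [] ↔ (k, p) ∈ aa := by
  unfold childrenDict
  rw [PySem.Dict.getD_foldl_modify_append]
  simp [List.mem_filter]

-- the order dict maps the i-th key to i
lemma orderDict_getD (aa : List (Int × Int)) (hnd : (aa.map Prod.fst).Nodup)
    (i : Nat) (h : i < (aa.map Prod.fst).length) :
    (orderDict aa).getD (aa.map Prod.fst)[i] 0 = (i : Int) := by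
  have hitems : (orderDict aa).items =
      (PySem.List.enumerate (aa.map Prod.fst) 0).map (fun a => (a.2, a.1)) := by
    unfold orderDict
    have h2 := PySem.Dict.items_foldl_insert_fresh
      (PySem.List.enumerate (aa.map Prod.fst) 0) (fun p => p.2) (fun p => p.1) PySem.Dict.empty
      (by intro a _; simp [PySem.Dict.contains_empty])
      (by rw [PySem.List.map_snd_enumerate]; exact hnd)
    simpa using h2
  have hkeysnd : (orderDict aa).keys.Nodup := by
    have hk : (orderDict aa).keys = (aa.map Prod.fst) := by
      simp only [PySem.Dict.keys, hitems, List.map_map]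
      rw [show (Prod.fst ∘ fun a : Int × Int => (a.2, a.1)) = (fun x : Int × Int => x.2) from rfl,
        PySem.List.map_snd_enumerate]
    rw [hk]; exact hnd
  apply PySem.Dict.getD_of_mem_items _ _ hkeysnd
  rw [hitems]
  refine List.mem_map.mpr ⟨((i : Int), (aa.map Prod.fst)[i]), ?_, rfl⟩
  rw [PySem.List.mem_enumerate_iff]
  exact ⟨i, h, by simp⟩

-- keys are strictly increasing under the order index
lemma keys_pairwise_order (aa : List (Int × Int)) (hnd : (aa.map Prod.fst).Nodup) :
    (aa.map Prod.fst).Pairwise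
      (fun a b => (orderDict aa).getD a 0 < (orderDict aa).getD b 0) := by
  rw [List.pairwise_iff_getElem]
  intro i j hi hj hij
  rw [orderDict_getD aa hnd i hi, orderDict_getD aa hnd j hj]
  exact_mod_cast hij

-- the sorted gathered level equals A's scan of the dict
lemma level_eq (aa : List (Int × Int)) (hnd : (aa.map Prod.fst).Nodup)
    (S T : List Int) (hmem : ∀ x, x ∈ S ↔ x ∈ T) :
    PySem.List.sorted
      (PySem.Set.ofList (S.foldl (fun acc p => acc ++ (childrenDict aa).getD p []) []))
      (fun k => (orderDict aa).getD k 0) false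
      = direct_child aa T := by
  apply PySem.List.sorted_eq_of_perm_of_pairwise_lt
  · -- permutation: both nodup with the same members
    rw [List.perm_ext_iff_of_nodup, direct_child_eq]
    · intro x
      rw [PySem.Set.mem_ofList, PySem.List.foldl_append_eq_flatMap]
      simp only [List.nil_append, List.mem_flatMap, mem_childrenDict,
        List.mem_map, List.mem_filter, decide_eq_true_eq]
      constructor
      · rintro ⟨⟨k, p⟩, ⟨hkp, hpT⟩, hx⟩
        simp only at hx hpT hkp
        subst hx
        exact ⟨p, (hmem p).mpr hpT, hkp⟩
      · rintro ⟨p, hp, hkp⟩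
        exact ⟨(x, p), ⟨hkp, (hmem p).mp hp⟩, rfl⟩
    · rw [direct_child_eq]
      exact hnd.sublist (List.filter_sublist.map Prod.fst)
    · exact PySem.Set.nodup_ofList _
  · -- strictly increasing order index
    rw [direct_child_eq]
    exact (keys_pairwise_order aa hnd).sublist (List.filter_sublist.map Prod.fst)

-- the two loops stay in lock-step: frontier and child have the same members, out is shared
lemma loop_eq (aa : List (Int × Int)) (hnd : (aa.map Prod.fst).Nodup) :
    ∀ (n : Nat) (S T out : List Int), (∀ x, x ∈ S ↔ x ∈ T) →
      descLoopA aa n T out = descLoopB (childrenDict aa) (orderDict aa) n S out := by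
  intro n
  induction n with
  | zero => intro S T out _; rfl
  | succ m ih =>
    intro S T out hmem
    rw [descLoopA, descLoopB]
    by_cases hT : T = []
    · subst hT
      have hS : S = [] := by
        rw [List.eq_nil_iff_forall_not_mem]
        intro x hx; exact (List.not_mem_nil) ((hmem x).mp hx)
      simp [hS]
    · have hS : ¬ S = [] := by
        intro h; subst h
        rcases List.exists_mem_of_ne_nil T hT with ⟨x, hx⟩
        exact (List.not_mem_nil) ((hmem x).mpr hx)
      rw [if_neg hT, if_neg hS]
      have hlvl := level_eq aa hnd S T hmem
      simp only [hlvl]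
      exact ih _ _ _ (fun x => PySem.Set.mem_ofList _ x)

-- ===== VERDICT (by name: the statement is the Claim_ definition above) =====
theorem descendance_spec : Claim_equal_descendance := by
  intro aa bb _ hpre
  unfold Spec_descendance descendance descendance_alt
  exact loop_eq aa hpre.1 (aa.length + 2) (PySem.Set.ofList bb) bb bb
    (fun x => PySem.Set.mem_ofList bb x)
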